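-- pv_equiv track=rewrite | github.com/Ding-Yucheng/LED_Matrix_Driver | main.py | create_inverted_triangle_matrix
-- ===== SOURCE A (Python) =====
-- def create_inverted_triangle_matrix(size):
--     matrix = []
--     for i in range(size):
--         row = []
--         num_zeros = i
--         num_ones = size - i
--         row.extend([0] * num_ones)
--         row.extend([1] * num_zeros)
--         matrix.append(row)
--     return matrix
-- ===== SOURCE B (Python) =====
-- def create_inverted_triangle_matrix(size):
--     return [[1 if j >= size - i else 0 for j in range(size)] for i in range(size)]
-- ===== Notes on version B (the rewrite author's own statement) =====
-- stated objective: idiomatic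
-- what changed: Replaces the two contiguous block-extend fills per row with a per-cell comparison predicate (emit 1 iff j >= size - i) in a nested comprehension.
import Mathlib
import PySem

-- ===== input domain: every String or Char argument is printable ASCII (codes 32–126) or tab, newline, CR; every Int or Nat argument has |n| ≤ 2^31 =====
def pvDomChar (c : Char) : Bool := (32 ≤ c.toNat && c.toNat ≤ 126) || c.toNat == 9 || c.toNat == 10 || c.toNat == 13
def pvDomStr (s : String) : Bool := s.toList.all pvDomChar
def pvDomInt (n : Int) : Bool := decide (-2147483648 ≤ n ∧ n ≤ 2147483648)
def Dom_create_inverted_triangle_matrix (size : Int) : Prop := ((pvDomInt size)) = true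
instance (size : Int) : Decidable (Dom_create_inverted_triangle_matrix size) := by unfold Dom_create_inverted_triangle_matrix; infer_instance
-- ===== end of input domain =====

-- B replaces A's two contiguous block fills per row with a per-cell positional predicate (1 iff j ≥ size - i); same cost, more idiomatic.

-- ===== PORT A =====
-- matrix = []; for i in range(size): row = [0]*(size-i) ++ [1]*i; matrix.append(row)
-- ([x]*n with negative n is [] in Python; Int.toNat clamps negatives to 0 the same way)
def create_inverted_triangle_matrix (size : Int) : List (List Int) :=
  (PySem.List.pyRange 0 size 1).foldl
    (fun matrix i =>
      matrix ++ [List.replicate (size - i).toNat (0 : Int) ++ List.replicate i.toNat (1 : Int)])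
    []

-- ===== PORT B =====
-- [[1 if j >= size - i else 0 for j in range(size)] for i in range(size)]
def create_inverted_triangle_matrix_alt (size : Int) : List (List Int) :=
  (PySem.List.pyRange 0 size 1).map
    (fun i => (PySem.List.pyRange 0 size 1).map (fun j => if size - i ≤ j then (1 : Int) else 0))

-- ===== PRECONDITION & SPEC =====
def Spec_create_inverted_triangle_matrix (size : Int) (out : List (List Int)) : Prop := out = create_inverted_triangle_matrix_alt size
instance (size : Int) (out : List (List Int)) : Decidable (Spec_create_inverted_triangle_matrix size out) := by unfold Spec_create_inverted_triangle_matrix; infer_instance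

-- ===== CLAIM (what is proved, stated in full; the proofs are below) =====
def Claim_equal_create_inverted_triangle_matrix : Prop := ∀ (size : Int), Dom_create_inverted_triangle_matrix size → Spec_create_inverted_triangle_matrix size (create_inverted_triangle_matrix size)

-- ===== LEMMAS AND PROOFS =====

-- A row of A (two replicate blocks) equals B's per-cell row, for 0 ≤ i < size.
theorem pv_row_eq (n k : Nat) (hk : k < n) :
    List.replicate (((n : Int) - (k : Int)).toNat) (0 : Int) ++ List.replicate ((k : Int)).toNat (1 : Int)
      = (List.range n).map (fun (j : Nat) => if (n : Int) - (k : Int) ≤ (j : Int) then (1 : Int) else 0) := by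
  apply List.ext_getElem
  · simp; omega
  · intro j h1 h2
    have hj : j < n := by simpa using h2
    simp only [List.getElem_map, List.getElem_range, List.getElem_append,
      List.length_replicate, List.getElem_replicate]
    split_ifs <;> omega

theorem create_inverted_triangle_matrix_spec : Claim_equal_create_inverted_triangle_matrix := by
  intro size _
  show create_inverted_triangle_matrix size = create_inverted_triangle_matrix_alt size
  unfold create_inverted_triangle_matrix create_inverted_triangle_matrix_alt
  rw [PySem.List.foldl_append_singleton_eq_map]
  rcases (by omega : size ≤ 0 ∨ 0 < size) with h | h
  · have : PySem.List.pyRange 0 size 1 = [] := by simp [PySem.List.pyRange]; omega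
    simp [this]
  · obtain ⟨n, rfl⟩ : ∃ n : Nat, size = (n : Int) := ⟨size.toNat, by omega⟩
    rw [show PySem.List.pyRange 0 (n : Int) 1 = (List.range n).map (fun (k : Nat) => (k : Int)) from
      PySem.List.pyRange_zero_natCast n]
    simp only [List.nil_append, List.map_map]
    apply List.map_congr_left
    intro k hk
    exact pv_row_eq n k (List.mem_range.mp hk)
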